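-- pv_equiv track=rewrite | github.com/kh277/BOJ | 백준/Gold/13703. 물벼룩의 생존확률/물벼룩의 생존확률.py | solve
-- ===== SOURCE A (Python) =====
-- move = [-1, 1]
--
-- def solve(K, N):
--     if K - 3*N > 0:
--         return 0
--
--     DP = [[0 for _ in range(K+3*N+1)] for _ in range(N+1)]
--     DP[0][K] = 1
--
--     for t in range(N):
--         for curH in range(1, K+3*N+1):
--             if DP[t][curH] == 0:
--                 continue
--             for dH in move:
--                 nextH = curH + dH
--                 if nextH <= 0:
--                     nextH = 0
--                 DP[t+1][nextH] += DP[t][curH]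
--
--     return sum(DP[N]) - DP[N][0]
-- ===== SOURCE B (Python) =====
-- from math import comb
--
-- def solve(K, N):
--     # reflection principle: survivors = sum of a contiguous window of K binomials C(N, j)
--     if K - 3*N > 0:
--         return 0
--     if K <= 0:
--         return 0
--     j0 = (N - K) // 2 + 1
--     total = 0
--     for i in range(K):
--         j = j0 + i
--         if j >= 0:
--             total += comb(N, j)
--     return total
-- ===== Notes on version B (the rewrite author's own statement) =====
-- stated objective: faster
-- what changed: Replaces the O(N*(K+3N)) dynamic-programming table over (time, height) by the reflection-principle closed form: the number of surviving paths is a contiguous window of K binomial coefficients sum_{i<K} C(N, (N-K)//2+1+i), computed in a single O(K)-term loop.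
-- intended difference: For K < 0 with 0 <= 2K+3N and K+N < 0, A's DP[0][K] = 1 hits Python's negative-index wraparound and A returns the (positive) survivor count of a walk started at the accidental height 2K+3N+1, while B returns 0, the intended value since a flea starting at non-positive height is already dead. — e.g. on solve(-4, 3): A returns 6, B returns 0
-- outside the precondition, e.g. on solve(-2, 1): A returns 0, B returns 0
import Mathlib
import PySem

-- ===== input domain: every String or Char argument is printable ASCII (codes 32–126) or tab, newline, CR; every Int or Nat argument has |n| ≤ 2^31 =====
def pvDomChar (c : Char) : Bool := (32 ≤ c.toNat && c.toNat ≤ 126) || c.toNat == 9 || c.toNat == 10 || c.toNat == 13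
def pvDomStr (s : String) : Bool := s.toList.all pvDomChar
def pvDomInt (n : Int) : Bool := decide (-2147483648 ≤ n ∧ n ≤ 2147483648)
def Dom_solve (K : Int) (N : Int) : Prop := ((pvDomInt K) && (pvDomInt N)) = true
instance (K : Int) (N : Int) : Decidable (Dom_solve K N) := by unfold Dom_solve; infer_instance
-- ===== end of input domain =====

-- B replaces A's O(N*(K+3N)) survival DP by the reflection-principle closed form
-- (a window of K binomial coefficients), an asymptotically faster exact algorithm.


-- ===== PORT A =====
-- the `for dH in move:` body: two conditional-clamped writes DP[t+1][nextH] += DP[t][curH].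
-- pySetD/pyGetD out-of-range never occurs on inputs satisfying Pre_solve
-- (in Python such inputs raise IndexError; they are excluded by Pre_solve).
def dhLoop (v : Int) (curH : Int) (nx : List Int) : List Int :=
  [(-1 : Int), 1].foldl (fun nx dH =>
    let nextH := curH + dH
    let nextH := if nextH ≤ 0 then 0 else nextH
    PySem.List.pySetD nx nextH (PySem.List.pyGetD nx nextH 0 + v)) nx

-- the `for curH in range(1, K+3*N+1):` loop building row t+1 (`next`) from row t (`row`)
def curHLoop (width : Int) (row next : List Int) : List Int :=
  (PySem.List.pyRange 1 width 1).foldl (fun next curH =>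
    if PySem.List.pyGetD row curH 0 == 0 then next
    else dhLoop (PySem.List.pyGetD row curH 0) curH next) next

def solve (K : Int) (N : Int) : Int :=
  if K - 3*N > 0 then 0
  else
    let width := K + 3*N + 1
    let zrow : List Int := (PySem.List.pyRange 0 width 1).map (fun _ => 0)  -- a fresh all-zero DP row
    let row0 := PySem.List.pySetD zrow K 1                                  -- DP[0][K] = 1
    let rowN := (PySem.List.pyRange 0 N 1).foldl (fun row _t => curHLoop width row zrow) row0
    rowN.foldl (· + ·) 0 - PySem.List.pyGetD rowN 0 0                       -- sum(DP[N]) - DP[N][0]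

-- ===== PORT B =====
def solve_alt (K : Int) (N : Int) : Int :=
  if K - 3*N > 0 then 0
  else if K ≤ 0 then 0
  else
    let j0 := PySem.Int.floordiv (N - K) 2 + 1
    (PySem.List.pyRange 0 K 1).foldl (fun total i =>
      let j := j0 + i
      if 0 ≤ j then total + ((Nat.choose N.toNat j.toNat : Nat) : Int) else total) 0

-- ===== PRECONDITION & SPEC =====
-- Pre_solve excludes exactly the inputs on which A raises IndexError (negative N with an
-- empty DP, or a negative K whose wrapped index is out of range or whose walk overruns the
-- row width), plus the degenerate wrapped case 2K+3N = -1 where DP[0][-K] lands on index 0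
-- and A returns 0 (as does B).
def Pre_solve (K : Int) (N : Int) : Prop :=
  K - 3*N > 0 ∨ (0 ≤ N ∧ 0 ≤ K) ∨ (0 ≤ N ∧ K < 0 ∧ 0 ≤ 2*K + 3*N ∧ K + N < 0)
instance (K : Int) (N : Int) : Decidable (Pre_solve K N) := by unfold Pre_solve; infer_instance
def pvWitness_solve : Int × Int := (2, 3)

-- For K < 0 with 0 ≤ 2K+3N and K+N < 0, A's `DP[0][K] = 1` hits Python's negative-index
-- wraparound and A returns the positive survivor count of a walk started at the accidental
-- height 2K+3N+1, while B returns 0 — the intended value, since a flea starting at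
-- non-positive height is already dead.
def D_solve (K : Int) (N : Int) : Prop := 0 ≤ N ∧ K < 0 ∧ 0 ≤ 2*K + 3*N ∧ K + N < 0
instance (K : Int) (N : Int) : Decidable (D_solve K N) := by unfold D_solve; infer_instance

def Spec_solve (K : Int) (N : Int) (out : Int) : Prop := ¬ D_solve K N → out = solve_alt K N
instance (K : Int) (N : Int) (out : Int) : Decidable (Spec_solve K N out) := by
  unfold Spec_solve; infer_instance

def pvDiffWitness_solve : Int × Int := (-4, 3)
def pvDiffWitnessOut_solve : Int × Int := (6, 0)

-- ===== CLAIM (what is proved, stated in full; the proofs are below) =====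
def Claim_unchanged_solve : Prop :=
  ∀ (K : Int) (N : Int), Dom_solve K N → Pre_solve K N → Spec_solve K N (solve K N)
def Claim_changed_solve : Prop :=
  Dom_solve (pvDiffWitness_solve.1) (pvDiffWitness_solve.2) ∧
  Pre_solve (pvDiffWitness_solve.1) (pvDiffWitness_solve.2) ∧
  D_solve (pvDiffWitness_solve.1) (pvDiffWitness_solve.2) ∧
  solve (pvDiffWitness_solve.1) (pvDiffWitness_solve.2) = pvDiffWitnessOut_solve.1 ∧
  solve_alt (pvDiffWitness_solve.1) (pvDiffWitness_solve.2) = pvDiffWitnessOut_solve.2 ∧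
  pvDiffWitnessOut_solve.1 ≠ pvDiffWitnessOut_solve.2
def Claim_exact_solve : Prop :=
  ∀ (K : Int) (N : Int), Dom_solve K N → Pre_solve K N → D_solve K N → solve K N ≠ solve_alt K N

-- ===== LEMMAS AND PROOFS =====

-- `ch s j` = C(s, j) extended by 0 to out-of-range integer lower index (math.comb's value)
def ch (s : ℕ) (j : ℤ) : ℤ := if 0 ≤ j then ((Nat.choose s j.toNat : Nat) : ℤ) else 0

-- number of ±1 walks of length s from height h ≥ 1 that never reach 0
def Gfun : ℕ → ℕ → ℤ
  | 0, _ => 1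
  | _+1, 0 => 0
  | s+1, 1 => Gfun s 2
  | s+1, h+2 => Gfun s (h+1) + Gfun s (h+3)

-- the closed form: a window of h binomial coefficients
def Gwin (s h : ℕ) : ℤ :=
  ∑ i ∈ Finset.range h, ch s (PySem.Int.floordiv ((s : ℤ) - (h : ℤ)) 2 + 1 + (i : ℤ))

-- weight used for the DP invariant: dead height 0 counts 0
def wtf (s h : ℕ) : ℤ := if h = 0 then 0 else Gfun s h

-- mathematical row of A's DP for start height s0
def qrow (s0 : ℕ) : ℕ → ℕ → ℤ
  | 0, h => if h = s0 then 1 else 0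
  | t+1, h => qrow s0 t (h+1) + (if 2 ≤ h then qrow s0 t (h-1) else 0)


lemma getD_set_char (l : List Int) (i h : ℕ) (v : Int) (hi : i < l.length) :
    (l.set i v).getD h 0 = if h = i then v else l.getD h 0 := by
  unfold List.getD
  rw [List.getElem?_set]
  by_cases e : i = h
  · rw [if_pos e, if_pos e.symm, if_pos (e ▸ hi)]; simp
  · rw [if_neg e, if_neg (fun hh => e hh.symm)]

lemma foldl_add_init (l : List Int) : ∀ a : Int, l.foldl (· + ·) a = a + l.sum := by
  induction l with
  | nil => simp
  | cons x xs ih => intro a; simp [List.foldl_cons, ih, List.sum_cons]; ring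

lemma sum_foldl (l : List Int) :
    l.foldl (· + ·) 0 = ∑ h ∈ Finset.range l.length, l.getD h 0 := by
  rw [foldl_add_init, zero_add]
  induction l with
  | nil => simp
  | cons x xs ih =>
    rw [List.sum_cons, List.length_cons, Finset.sum_range_succ']
    simp [ih]
    ring

lemma ch_pascal (s : ℕ) (j : ℤ) : ch (s+1) j = ch s (j-1) + ch s j := by
  unfold ch
  rcases lt_trichotomy j 0 with h | h | h
  · rw [if_neg (by omega), if_neg (by omega), if_neg (by omega)]; ring
  · subst h
    rw [if_pos le_rfl, if_neg (by omega), if_pos le_rfl]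
    simp
  · rw [if_pos (by omega), if_pos (by omega), if_pos (by omega)]
    obtain ⟨m, rfl⟩ : ∃ m : ℕ, j = (m : ℤ) + 1 := ⟨(j-1).toNat, by omega⟩
    have h1 : ((m:ℤ) + 1).toNat = m + 1 := by omega
    have h2 : ((m:ℤ) + 1 - 1).toNat = m := by omega
    rw [h1, h2, Nat.choose_succ_succ]
    push_cast
    ring

lemma sum_indicator (n : ℕ) (a : ℤ) :
    (∑ i ∈ Finset.range n, if a + (i : ℤ) = 0 then (1:ℤ) else 0) =
      if a ≤ 0 ∧ 0 < a + n then 1 else 0 := by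
  induction n with
  | zero => rw [Finset.sum_range_zero, eq_comm, ite_eq_right_iff]; push_cast; omega
  | succ n ih =>
    rw [Finset.sum_range_succ, ih]
    split_ifs <;> push_cast at * <;> omega

lemma G_pos : ∀ (s h : ℕ), 1 ≤ h → 1 ≤ Gfun s h := by
  intro s
  induction s with
  | zero => intro h _; exact le_of_eq (by simp [Gfun])
  | succ s ih =>
    intro h hh
    match h, hh with
    | 1, _ => exact ih 2 (by omega)
    | (m+2), _ =>
      show 1 ≤ Gfun s (m+1) + Gfun s (m+3)
      have := ih (m+1) (by omega); have := ih (m+3) (by omega); omega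

lemma q_supp (s0 : ℕ) : ∀ (t h : ℕ), s0 + t < h → qrow s0 t h = 0 := by
  intro t
  induction t with
  | zero => intro h hh; simp [qrow]; omega
  | succ t ih =>
    intro h hh
    show qrow s0 t (h+1) + (if 2 ≤ h then qrow s0 t (h-1) else 0) = 0
    rw [ih (h+1) (by omega)]
    split_ifs with h2
    · rw [ih (h-1) (by omega)]; ring
    · ring

lemma ch_zero (j : ℤ) : ch 0 j = if j = 0 then 1 else 0 := by
  unfold ch
  rcases lt_trichotomy j 0 with h | h | h
  · rw [if_neg (by omega), if_neg (by omega)]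
  · subst h; simp
  · rw [if_pos (by omega), if_neg (by omega)]
    obtain ⟨m, rfl⟩ : ∃ m : ℕ, j = (m:ℤ) + 1 := ⟨(j-1).toNat, by omega⟩
    have h1 : ((m:ℤ) + 1).toNat = m + 1 := by omega
    rw [h1, Nat.choose_zero_succ]; simp

lemma fd2 (x : ℤ) : PySem.Int.floordiv x 2 = x / 2 :=
  PySem.Int.floordiv_eq_ediv_of_pos (by norm_num)

def win (s : ℕ) (a : ℤ) (n : ℕ) : ℤ := ∑ i ∈ Finset.range n, ch s (a + (i:ℤ))

lemma Gwin_eq (s h : ℕ) : Gwin s h = win s (((s:ℤ) - (h:ℤ)) / 2 + 1) h := by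
  unfold Gwin win
  exact Finset.sum_congr rfl (fun i _ => by rw [fd2])

lemma win_one (s : ℕ) (a : ℤ) : win s a 1 = ch s a := by
  unfold win; rw [Finset.sum_range_one]; norm_num

lemma win_succ (s : ℕ) (a : ℤ) (n : ℕ) : win s a (n+1) = win s a n + ch s (a + (n:ℤ)) := by
  unfold win; rw [Finset.sum_range_succ]

lemma win_pascal (s : ℕ) (a : ℤ) (n : ℕ) :
    win (s+1) a n = win s (a-1) n + win s a n := by
  unfold win
  rw [← Finset.sum_add_distrib]
  refine Finset.sum_congr rfl (fun i _ => ?_)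
  rw [ch_pascal]
  congr 2
  ring

lemma G_eq_Gwin : ∀ (s h : ℕ), 1 ≤ h → Gfun s h = Gwin s h := by
  intro s
  induction s with
  | zero =>
    intro h hh
    show (1:ℤ) = Gwin 0 h
    rw [Gwin_eq]
    unfold win
    rw [Finset.sum_congr rfl (fun i _ => ch_zero _), sum_indicator]
    rw [if_pos (by constructor <;> omega)]
  | succ s ih =>
    intro h hh
    match h, hh with
    | 1, _ =>
      show Gfun s 2 = Gwin (s+1) 1
      rw [ih 2 (by omega), Gwin_eq, Gwin_eq, win_pascal, win_one, win_one]
      rw [show (2:ℕ) = 1 + 1 from rfl, win_succ, win_one]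
      have e1 : ((s:ℤ) - (1+1:ℕ)) / 2 + 1 = ((s+1:ℕ) - (1:ℕ) : ℤ) / 2 + 1 - 1 := by
        push_cast; omega
      have e2 : ((s:ℤ) - (1+1:ℕ)) / 2 + 1 + ((1:ℕ):ℤ) = ((s+1:ℕ) - (1:ℕ) : ℤ) / 2 + 1 := by
        push_cast; omega
      rw [e1]
      push_cast
      ring_nf
    | (m+2), _ =>
      show Gfun s (m+1) + Gfun s (m+3) = Gwin (s+1) (m+2)
      rw [ih (m+1) (by omega), ih (m+3) (by omega), Gwin_eq, Gwin_eq, Gwin_eq, win_pascal]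
      set J : ℤ := ((s+1:ℕ) - (m+2:ℕ) : ℤ) / 2 + 1 with hJ
      have hJ1 : ((s:ℤ) - (m+1:ℕ)) / 2 + 1 = J := by rw [hJ]; push_cast; omega
      have hJ2 : ((s:ℤ) - (m+3:ℕ)) / 2 + 1 = J - 1 := by rw [hJ]; push_cast; omega
      rw [hJ1, hJ2]
      rw [show (m+3) = (m+2)+1 from rfl]
      rw [win_succ s (J-1) (m+2)]
      rw [show (m+2) = (m+1)+1 from rfl]
      rw [win_succ s J (m+1)]
      have efin : ch s (J - 1 + (((m+1)+1:ℕ):ℤ)) = ch s (J + ((m+1:ℕ):ℤ)) := by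
        congr 1; push_cast; ring
      rw [efin]
      ring

def innerBody (r : List Int) (nx : List Int) (k : ℕ) : List Int :=
  if PySem.List.pyGetD r (1 + (k:ℤ)) 0 == 0 then nx
  else dhLoop (PySem.List.pyGetD r (1 + (k:ℤ)) 0) (1 + (k:ℤ)) nx

lemma curHLoop_eq (W : ℕ) (r acc : List Int) :
    curHLoop (W : ℤ) r acc = (List.range (W - 1)).foldl (innerBody r) acc := by
  unfold curHLoop innerBody
  rw [PySem.List.pyRange_one, List.foldl_map]
  congr 1
  exact congrArg List.range (by omega)

lemma dhLoop_eq (v : Int) (m : ℕ) (nx : List Int) :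
    dhLoop v (1 + (m:ℤ)) nx =
      (nx.set m (nx.getD m 0 + v)).set (m+2)
        ((nx.set m (nx.getD m 0 + v)).getD (m+2) 0 + v) := by
  unfold dhLoop
  simp only [List.foldl_cons, List.foldl_nil]
  have e1 : (if 1 + (m:ℤ) + -1 ≤ 0 then 0 else 1 + (m:ℤ) + -1) = ((m:ℕ):ℤ) := by
    split_ifs <;> omega
  have e2 : (if 1 + (m:ℤ) + 1 ≤ 0 then 0 else 1 + (m:ℤ) + 1) = (((m+2:ℕ)):ℤ) := by
    split_ifs <;> push_cast <;> omega
  rw [e1, e2, PySem.List.pyGetD_natCast, PySem.List.pySetD_natCast,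
      PySem.List.pyGetD_natCast, PySem.List.pySetD_natCast]

lemma scatter_char (r : List Int) (W : ℕ)
    (htop : r.getD (W-1) 0 = 0) :
    ∀ (m : ℕ), m + 1 ≤ W → ∀ (acc : List Int), acc.length = W →
      ((List.range m).foldl (innerBody r) acc).length = W ∧
      ∀ h, h < W → ((List.range m).foldl (innerBody r) acc).getD h 0 =
        acc.getD h 0 + ((if h + 1 ≤ m then r.getD (h+1) 0 else 0) +
                        (if 2 ≤ h ∧ h ≤ m + 1 then r.getD (h-1) 0 else 0)) := by
  intro m
  induction m with
  | zero =>
    intro _ acc hacc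
    refine ⟨by simpa using hacc, fun h hh => ?_⟩
    rw [if_neg (by omega), if_neg (by omega)]
    simp
  | succ m ih =>
    intro hm acc hacc
    obtain ⟨ihL, ihE⟩ := ih (by omega) acc hacc
    rw [List.range_succ, List.foldl_append, List.foldl_cons, List.foldl_nil]
    set res := (List.range m).foldl (innerBody r) acc with hres
    have hidx : PySem.List.pyGetD r (1+(m:ℤ)) 0 = r.getD (m+1) 0 := by
      rw [show (1+(m:ℤ)) = (((m+1:ℕ)):ℤ) by push_cast; ring, PySem.List.pyGetD_natCast]
    by_cases hz : r.getD (m+1) 0 = 0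
    · have hcond : (PySem.List.pyGetD r (1+(m:ℤ)) 0 == 0) = true := by
        rw [hidx]; exact beq_iff_eq.mpr hz
      rw [innerBody, if_pos hcond]
      refine ⟨ihL, fun h hh => ?_⟩
      rw [ihE h hh]
      by_cases h1 : h = m
      · subst h1; simp only [hz]; split_ifs <;> omega
      · by_cases h2 : h = m + 2
        · subst h2
          rw [show m+2-1 = m+1 from rfl]
          simp only [hz]
          split_ifs <;> omega
        · split_ifs <;> omega
    · have hcond : ¬ (PySem.List.pyGetD r (1+(m:ℤ)) 0 == 0) = true := by
        rw [hidx]; exact fun e => hz (beq_iff_eq.mp e)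
      rw [innerBody, if_neg hcond, hidx, dhLoop_eq]
      have hmW : m + 1 ≠ W - 1 := by intro e; rw [e] at hz; exact hz htop
      have hm2 : m + 2 < W := by omega
      have hmlt : m < res.length := by omega
      have hm2A : m + 2 < (res.set m (res.getD m 0 + r.getD (m+1) 0)).length := by
        rw [List.length_set]; omega
      constructor
      · rw [List.length_set, List.length_set]; exact ihL
      · intro h hh
        rw [getD_set_char _ _ _ _ hm2A,
            getD_set_char _ _ _ _ hmlt, getD_set_char _ _ _ _ hmlt]
        by_cases h1 : h = m
        · subst h1
          rw [if_neg (by omega), if_pos rfl, ihE h (by omega)]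
          split_ifs <;> omega
        · by_cases h2 : h = m + 2
          · subst h2
            rw [if_pos rfl, if_neg (by omega), ihE (m+2) (by omega)]
            rw [show m+2-1 = m+1 from rfl]
            split_ifs <;> omega
          · rw [if_neg h2, if_neg h1, ihE h hh]
            split_ifs <;> omega

lemma outer_char (W s0 n : ℕ) (hs0 : s0 < W) (hb : s0 + n < W) :
    ∀ m, m ≤ n →
      (((List.range m).foldl (fun row (_ : ℕ) => curHLoop (W : ℤ) row (List.replicate W 0))
          ((List.replicate W (0:ℤ)).set s0 1)).length = W ∧
       ∀ h, h < W →
        ((List.range m).foldl (fun row (_ : ℕ) => curHLoop (W : ℤ) row (List.replicate W 0))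
          ((List.replicate W (0:ℤ)).set s0 1)).getD h 0 = qrow s0 m h) := by
  intro m
  induction m with
  | zero =>
    intro _
    refine ⟨by simp, fun h hh => ?_⟩
    rw [List.range_zero, List.foldl_nil,
        getD_set_char _ _ _ _ (by rw [List.length_replicate]; omega)]
    by_cases e : h = s0
    · rw [if_pos e]; simp [qrow, e]
    · rw [if_neg e, List.getD_replicate _ hh]; simp [qrow, e]
  | succ m ih =>
    intro hm
    obtain ⟨ihL, ihE⟩ := ih (by omega)
    rw [List.range_succ, List.foldl_append, List.foldl_cons, List.foldl_nil]
    set resm := (List.range m).foldl (fun row (_ : ℕ) => curHLoop (W : ℤ) row (List.replicate W 0))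
          ((List.replicate W (0:ℤ)).set s0 1) with hres
    rw [curHLoop_eq]
    have htop : resm.getD (W-1) 0 = 0 := by
      rw [ihE (W-1) (by omega)]
      exact q_supp s0 m (W-1) (by omega)
    obtain ⟨scL, scE⟩ := scatter_char resm W htop (W-1) (by omega)
      (List.replicate W 0) (by simp)
    refine ⟨scL, fun h hh => ?_⟩
    rw [scE h hh, List.getD_replicate _ hh]
    show _ = qrow s0 m (h+1) + (if 2 ≤ h then qrow s0 m (h-1) else 0)
    have e2 : (if 2 ≤ h ∧ h ≤ (W-1) + 1 then resm.getD (h-1) 0 else 0)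
        = (if 2 ≤ h then qrow s0 m (h-1) else 0) := by
      by_cases c : 2 ≤ h
      · rw [if_pos ⟨c, by omega⟩, if_pos c, ihE (h-1) (by omega)]
      · rw [if_neg (fun hc => c hc.1), if_neg c]
    rw [e2]
    by_cases c1 : h + 1 ≤ W - 1
    · rw [if_pos c1, ihE (h+1) (by omega)]; ring
    · rw [if_neg c1, q_supp s0 m (h+1) (by omega)]; ring

lemma dual (W s0 n : ℕ) (hs0 : s0 < W) (hb : s0 + n < W) :
    ∀ t, t ≤ n → (∑ h ∈ Finset.range W, qrow s0 t h * wtf (n - t) h) = wtf n s0 := by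
  intro t
  induction t with
  | zero =>
    intro _
    have : ∀ h ∈ Finset.range W, qrow s0 0 h * wtf (n - 0) h
        = if h = s0 then wtf n h else 0 := by
      intro h _
      show (if h = s0 then (1:ℤ) else 0) * wtf (n-0) h = _
      by_cases e : h = s0 <;> simp [e]
    rw [Finset.sum_congr rfl this, Finset.sum_ite_eq' (Finset.range W) s0 (fun h => wtf n h)]
    rw [if_pos (Finset.mem_range.mpr hs0)]
  | succ t ih =>
    intro ht
    obtain ⟨m, rfl⟩ : ∃ m, W = m + 2 := ⟨W - 2, by omega⟩
    have hsupp1 : qrow s0 t (m+2) = 0 := q_supp s0 t (m+2) (by omega)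
    have hsupp2 : qrow s0 t (m+1) = 0 := q_supp s0 t (m+1) (by omega)
    set s := n - (t+1) with hs
    have hnt : n - t = s + 1 := by omega
    -- expand qrow (t+1)
    have expand : ∀ h ∈ Finset.range (m+2), qrow s0 (t+1) h * wtf s h
        = qrow s0 t (h+1) * wtf s h + (if 2 ≤ h then qrow s0 t (h-1) else 0) * wtf s h := by
      intro h _
      show (qrow s0 t (h+1) + (if 2 ≤ h then qrow s0 t (h-1) else 0)) * wtf s h = _
      ring
    rw [Finset.sum_congr rfl expand, Finset.sum_add_distrib]
    -- S1
    have hS1 : (∑ h ∈ Finset.range (m+2), qrow s0 t (h+1) * wtf s h)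
        = ∑ h ∈ Finset.range (m+2), qrow s0 t h * wtf s (h-1) := by
      have A := Finset.sum_range_succ' (fun x => qrow s0 t x * wtf s (x-1)) (m+2)
      have B := Finset.sum_range_succ (fun x => qrow s0 t x * wtf s (x-1)) (m+2)
      simp only [Nat.add_sub_cancel, Nat.zero_sub] at A B
      rw [hsupp1] at B
      rw [show wtf s 0 = 0 from rfl] at A
      norm_num at A B
      linarith [A, B]
    -- S2
    have hS2 : (∑ h ∈ Finset.range (m+2), (if 2 ≤ h then qrow s0 t (h-1) else 0) * wtf s h)
        = (∑ h ∈ Finset.range (m+2), qrow s0 t h * wtf s (h+1)) - qrow s0 t 0 * wtf s 1 := by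
      have A1 := Finset.sum_range_succ' (fun x => (if 2 ≤ x then qrow s0 t (x-1) else 0) * wtf s x) (m+1)
      have A2 := Finset.sum_range_succ' (fun x => (if 2 ≤ x+1 then qrow s0 t ((x+1)-1) else 0) * wtf s (x+1)) m
      have A3 := Finset.sum_range_succ' (fun x => qrow s0 t x * wtf s (x+1)) (m+1)
      have A4 := Finset.sum_range_succ (fun x => qrow s0 t (x+1) * wtf s ((x+1)+1)) m
      have ec : (∑ x ∈ Finset.range m, (if 2 ≤ (x+1)+1 then qrow s0 t (((x+1)+1)-1) else 0) * wtf s ((x+1)+1))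
          = ∑ x ∈ Finset.range m, qrow s0 t (x+1) * wtf s ((x+1)+1) :=
        Finset.sum_congr rfl (fun x _ => by rw [if_pos (by omega), Nat.add_sub_cancel])
      have e0 : (if 2 ≤ 0 then qrow s0 t (0-1) else 0) * wtf s 0 = 0 := by
        rw [if_neg (by omega)]; ring
      have e1 : (if 2 ≤ 0+1 then qrow s0 t ((0+1)-1) else 0) * wtf s (0+1) = 0 := by
        rw [if_neg (by omega)]; ring
      have hj : qrow s0 t (m+1) * wtf s ((m+1)+1) = 0 := by rw [hsupp2]; ring
      rw [ec] at A2
      rw [hj] at A4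
      rw [e0] at A1
      rw [e1] at A2
      norm_num at A1 A2 A3 A4 ⊢
      linarith [A1, A2, A3, A4]
    rw [hS1, hS2]
    -- combine pointwise
    have comb : ∀ h ∈ Finset.range (m+2),
        qrow s0 t h * wtf s (h-1) + qrow s0 t h * wtf s (h+1)
          - (if h = 0 then qrow s0 t 0 * wtf s 1 else 0)
        = qrow s0 t h * wtf (s+1) h := by
      intro h _
      match h with
      | 0 => simp [wtf]
      | 1 =>
        rw [if_neg (by omega)]
        show qrow s0 t 1 * wtf s 0 + qrow s0 t 1 * wtf s 2 - 0 = qrow s0 t 1 * wtf (s+1) 1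
        rw [show wtf s 0 = 0 from rfl, show wtf s 2 = wtf (s+1) 1 from rfl]
        ring
      | (y+2) =>
        rw [if_neg (by omega)]
        show qrow s0 t (y+2) * wtf s ((y+2)-1) + qrow s0 t (y+2) * wtf s (y+3) - 0
            = qrow s0 t (y+2) * wtf (s+1) (y+2)
        rw [show (y+2)-1 = y+1 from rfl]
        rw [show wtf s (y+1) = Gfun s (y+1) from by rw [wtf, if_neg (by omega)],
            show wtf s (y+3) = Gfun s (y+3) from by rw [wtf, if_neg (by omega)],
            show wtf (s+1) (y+2) = Gfun s (y+1) + Gfun s (y+3) from by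
              rw [wtf, if_neg (by omega)]; rfl]
        ring
    have hsum : (∑ h ∈ Finset.range (m+2), qrow s0 t h * wtf s (h-1))
         + ((∑ h ∈ Finset.range (m+2), qrow s0 t h * wtf s (h+1)) - qrow s0 t 0 * wtf s 1)
        = ∑ h ∈ Finset.range (m+2), qrow s0 t h * wtf (s+1) h := by
      rw [← Finset.sum_congr rfl comb]
      rw [Finset.sum_sub_distrib, Finset.sum_add_distrib]
      rw [Finset.sum_ite_eq' (Finset.range (m+2)) 0 (fun _ => qrow s0 t 0 * wtf s 1)]
      rw [if_pos (Finset.mem_range.mpr (by omega))]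
      ring
    rw [hsum]
    have ih2 := ih (by omega)
    rw [hnt] at ih2
    exact ih2

lemma zrow_repl (w : ℤ) :
    (PySem.List.pyRange 0 w 1).map (fun _ => (0:ℤ)) = List.replicate w.toNat 0 := by
  rw [PySem.List.pyRange_one, List.map_map]
  have : (w - 0).toNat = w.toNat := by omega
  rw [this]
  apply List.eq_replicate_iff.mpr
  constructor
  · simp
  · intro b hb
    simp at hb
    omega

lemma solve_char (K N : Int) (hN : 0 ≤ N) (hKle : ¬ K - 3*N > 0) (s0 : ℕ)
    (hset : PySem.List.pySetD (List.replicate (K+3*N+1).toNat (0:ℤ)) K 1 =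
            (List.replicate (K+3*N+1).toNat (0:ℤ)).set s0 1)
    (hs0 : s0 < (K+3*N+1).toNat) (hb : s0 + N.toNat < (K+3*N+1).toNat) :
    solve K N = wtf N.toNat s0 := by
  have hWpos : 0 < K + 3*N + 1 := by omega
  simp only [solve, if_neg hKle, zrow_repl]
  rw [hset]
  set W := (K + 3*N + 1).toNat with hWdef
  rw [show K + 3*N + 1 = (W:ℤ) from by omega]
  rw [PySem.List.pyRange_one, List.foldl_map]
  rw [show ((N:ℤ) - 0).toNat = N.toNat from by omega]
  obtain ⟨oL, oE⟩ := outer_char W s0 N.toNat (by omega) (by omega) N.toNat le_rfl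
  rw [sum_foldl, oL, PySem.List.pyGetD_zero]
  rw [Finset.sum_congr rfl (fun h hh => oE h (Finset.mem_range.mp hh))]
  rw [show (List.foldl (fun row (_ : ℕ) => curHLoop (W:ℤ) row (List.replicate W 0))
        ((List.replicate W (0:ℤ)).set s0 1) (List.range N.toNat)).getD 0 0
      = qrow s0 N.toNat 0 from oE 0 (by omega)]
  have d := dual W s0 N.toNat (by omega) (by omega) N.toNat le_rfl
  simp only [Nat.sub_self] at d
  have conv1 : ∀ h ∈ Finset.range W, qrow s0 N.toNat h * wtf 0 h
      = qrow s0 N.toNat h - (if h = 0 then qrow s0 N.toNat 0 else 0) := by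
    intro h _
    match h with
    | 0 => simp [wtf]
    | y+1 =>
      rw [if_neg (by omega), show wtf 0 (y+1) = 1 from by rw [wtf, if_neg (by omega)]; rfl]
      ring
  rw [Finset.sum_congr rfl conv1, Finset.sum_sub_distrib,
      Finset.sum_ite_eq' (Finset.range W) 0 (fun _ => qrow s0 N.toNat 0),
      if_pos (Finset.mem_range.mpr (by omega))] at d
  linarith [d]

lemma foldl_win (s : ℕ) (a : ℤ) : ∀ n : ℕ,
    (List.range n).foldl (fun (total : ℤ) (k : ℕ) =>
      if 0 ≤ a + (0 + (k:ℤ)) then total + ((Nat.choose s (a + (0 + (k:ℤ))).toNat : ℕ) : ℤ) else total) 0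
      = win s a n := by
  intro n
  induction n with
  | zero => simp [win]
  | succ n ih =>
    rw [List.range_succ, List.foldl_append, List.foldl_cons, List.foldl_nil, ih, win_succ]
    by_cases c : 0 ≤ a + (0 + (n:ℤ))
    · rw [if_pos c]
      congr 1
      rw [ch, if_pos (by omega)]
      congr 2
      omega
    · rw [if_neg c, ch, if_neg (by omega)]; ring

lemma alt_char (K N : Int) (hKle : ¬ K - 3*N > 0) (hK : ¬ K ≤ 0) :
    solve_alt K N = Gwin N.toNat K.toNat := by
  have hN1 : 0 < N := by omega
  simp only [solve_alt, if_neg hKle, if_neg hK]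
  rw [PySem.List.pyRange_one, List.foldl_map]
  rw [show ((K:ℤ) - 0).toNat = K.toNat from by omega]
  rw [foldl_win N.toNat (PySem.Int.floordiv (N - K) 2 + 1) K.toNat]
  rw [Gwin_eq]
  congr 1
  rw [fd2]
  omega

lemma pySetD_neg (l : List Int) (i : ℤ) (v : Int) (hneg : i < 0)
    (hrange : -(l.length:ℤ) ≤ i) :
    PySem.List.pySetD l i v = l.set (l.length - (-i).toNat) v := by
  unfold PySem.List.pySetD PySem.List.pySet? PySem.List.pyIdx?
  rw [if_neg (by omega), if_pos hrange]
  rfl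

lemma solve_main (K N : Int) (hN : 0 ≤ N) (hK : 0 ≤ K) (hKle : ¬ K - 3*N > 0) :
    solve K N = wtf N.toNat K.toNat := by
  apply solve_char K N hN hKle K.toNat
  · rw [PySem.List.pySetD_of_nonneg (h := hK)]
  · omega
  · omega

lemma solve_wrapped (K N : Int) (hD : D_solve K N) :
    solve K N = wtf N.toNat (2*K+3*N+1).toNat := by
  obtain ⟨hN, hK, h2, h3⟩ := hD
  have hKle : ¬ K - 3*N > 0 := by omega
  apply solve_char K N hN hKle (2*K+3*N+1).toNat
  · rw [pySetD_neg _ _ _ (by omega) (by rw [List.length_replicate]; omega)]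
    congr 1
    rw [List.length_replicate]
    omega
  · omega
  · omega

-- ===== VERDICT (by name: the statement is the Claim_ definition above) =====
theorem solve_spec : Claim_unchanged_solve := by
  intro K N _ hPre
  unfold Spec_solve
  intro hnD
  by_cases h1 : K - 3*N > 0
  · rw [solve, if_pos h1, solve_alt, if_pos h1]
  · rcases hPre with h | ⟨hN, hK⟩ | hw
    · exact absurd h h1
    · by_cases hK0 : K ≤ 0
      · rw [solve_main K N hN hK h1, solve_alt, if_neg h1, if_pos hK0]
        rw [show K.toNat = 0 from by omega]
        rfl
      · rw [solve_main K N hN hK h1, alt_char K N h1 hK0]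
        rw [wtf, if_neg (by omega)]
        exact G_eq_Gwin N.toNat K.toNat (by omega)
    · exact absurd hw hnD

theorem solve_changed : Claim_changed_solve := by
  unfold Claim_changed_solve; decide

theorem solve_tight : Claim_exact_solve := by
  intro K N _ _ hD
  have hA := solve_wrapped K N hD
  obtain ⟨hN, hK, h2, h3⟩ := hD
  have hpos := G_pos N.toNat (2*K+3*N+1).toNat (by omega)
  have hB : solve_alt K N = 0 := by
    rw [solve_alt, if_neg (by omega), if_pos (by omega)]
  rw [hA, hB, wtf, if_neg (by omega)]
  omega
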